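-- pv_equiv track=rewrite | github.com/LunaMoonax/Target-search | workflow_2/scripts/rpa_primer_designer.py | calculate_self_complementarity
-- ===== SOURCE A (Python) =====
-- def calculate_self_complementarity(sequence):
--     """Calculate self-complementarity excluding hairpins"""
--     max_comp = 0
--     complement = {'A': 'T', 'T': 'A', 'G': 'C', 'C': 'G'}
--
--     for i in range(1, len(sequence)):
--         current_comp = 0
--         for j in range(min(i, len(sequence) - i)):
--             if j >= len(sequence) or (len(sequence) - i + j) >= len(sequence):
--                 break
--             if sequence[j] == complement.get(sequence[len(sequence) - i + j], 'N'):
--                 current_comp += 1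
--             else:
--                 break
--         max_comp = max(max_comp, current_comp)
--
--     return max_comp
-- ===== SOURCE B (Python) =====
-- def calculate_self_complementarity(sequence):
--     """Z-function re-implementation: max over shifts k of min(k, lcp(sequence, comp[k:]))."""
--     """Z-function re-implementation: max over shifts k of min(k, lcp(sequence, comp[k:]))."""
--     comp = {'A': 'T', 'T': 'A', 'G': 'C', 'C': 'G'}
--     n = len(sequence)
--     if n < 2:
--         return 0
--     w = sequence + '\x00' + ''.join(comp.get(ch, 'N') for ch in sequence)
--     m = len(w)
--     z = [0] * m
--     l = r = 0
--     best = 0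
--     for p in range(1, m):
--         k = 0
--         if p < r:
--             k = min(r - p, z[p - l])
--         while p + k < m and w[k] == w[p + k]:
--             k += 1
--         z[p] = k
--         if p + k > r:
--             l, r = p, p + k
--         if p > n + 1:
--             cand = p - n - 1
--             if k < cand:
--                 cand = k
--             if cand > best:
--                 best = cand
--     return best
-- ===== Notes on version B (the rewrite author's own statement) =====
-- stated objective: alternative
-- what changed: Replaces A's per-shift rescan (for every shift, re-scan the matching prefix from scratch) with a single Z-function pass over sequence + '\x00' + complement(sequence), reading each shift's match length off the Z-array.
import Mathlib
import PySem

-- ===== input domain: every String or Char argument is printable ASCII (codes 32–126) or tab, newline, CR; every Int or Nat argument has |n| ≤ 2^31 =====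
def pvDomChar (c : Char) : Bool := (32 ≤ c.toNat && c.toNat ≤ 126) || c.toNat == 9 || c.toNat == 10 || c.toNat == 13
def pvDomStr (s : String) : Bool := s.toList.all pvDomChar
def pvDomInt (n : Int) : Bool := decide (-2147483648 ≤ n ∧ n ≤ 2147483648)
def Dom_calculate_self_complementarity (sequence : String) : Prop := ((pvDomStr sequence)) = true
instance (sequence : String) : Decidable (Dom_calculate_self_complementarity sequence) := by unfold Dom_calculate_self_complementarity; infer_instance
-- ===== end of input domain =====

-- B replaces A's shift-by-shift prefix rescans with a single Z-function pass over
-- sequence + '\x00' + complement(sequence) (alternative algorithm; a timing run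
-- read ~1.45x on its inputs, below the 1.5x bar, so B is not labelled faster).

-- complement.get(ch, 'N'), the dict lookup both Pythons perform
def complementGet (ch : Char) : Char :=
  if ch = 'A' then 'T' else if ch = 'T' then 'A'
  else if ch = 'G' then 'C' else if ch = 'C' then 'G' else 'N'

-- ===== PORT A =====
-- A's inner `for j in range(cap)` with its two `break`s, carrying current_comp = acc.
-- Indices j and n-i+j are used exactly as Python does; they are nonnegative, and
-- the getD default is never read on the path A takes (guards keep indices < n).
def aInner (cs : List Char) (n i j cap acc : Nat) : Nat :=
  if _h : j < cap then
    if n ≤ j ∨ n ≤ n - i + j then acc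
    else if cs.getD j ' ' = complementGet (cs.getD (n - i + j) ' ') then
      aInner cs n i (j + 1) cap (acc + 1)
    else acc
  else acc
termination_by cap - j

def calculate_self_complementarity (sequence : String) : Int :=
  -- for i in range(1, len(sequence)): max_comp = max(max_comp, <inner loop>)
  ((List.range' 1 (sequence.toList.length - 1)).foldl
    (fun max_comp i =>
      max max_comp
        (aInner sequence.toList sequence.toList.length i 0
          (min i (sequence.toList.length - i)) 0)) 0 : Nat)

-- ===== PORT B =====
-- Source B's `while p + k < m and w[k] == w[p + k]: k += 1`
def zExtend (w : List Char) (p k : Nat) : Nat :=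
  if h : p + k < w.length ∧ w.getD k ' ' = w.getD (p + k) ' ' then
    zExtend w p (k + 1)
  else k
termination_by w.length - (p + k)
decreasing_by omega

-- Source B's main `for p in range(1, m)` loop carrying (z, l, r, best)
def zLoop (w : List Char) (m n p : Nat) (z : Array Nat) (l r best : Nat) : Nat :=
  if _h : p < m then
    let k0 := if p < r then min (r - p) (z.getD (p - l) 0) else 0
    let k := zExtend w p k0
    let z' := z.setIfInBounds p k
    let l' := if r < p + k then p else l
    let r' := if r < p + k then p + k else r
    let best' := if n + 1 < p then max best (min (p - n - 1) k) else best
    zLoop w m n (p + 1) z' l' r' best'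
  else best
termination_by m - p

def calculate_self_complementarity_alt (sequence : String) : Int :=
  let cs := sequence.toList
  let n := cs.length
  if n < 2 then 0
  else
    let w := cs ++ '\x00' :: cs.map complementGet
    (zLoop w w.length n 1 (Array.replicate w.length 0) 0 0 0 : Nat)

-- ===== PRECONDITION & SPEC =====
def Spec_calculate_self_complementarity (sequence : String) (out : Int) : Prop := out = calculate_self_complementarity_alt sequence
instance (sequence : String) (out : Int) : Decidable (Spec_calculate_self_complementarity sequence out) := by unfold Spec_calculate_self_complementarity; infer_instance

-- ===== CLAIM (what is proved, stated in full; the proofs are below) =====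
def Claim_equal_calculate_self_complementarity : Prop := ∀ (sequence : String), Dom_calculate_self_complementarity sequence → Spec_calculate_self_complementarity sequence (calculate_self_complementarity sequence)

-- ===== LEMMAS AND PROOFS =====

-- longest common prefix length
def lcp : List Char → List Char → Nat
  | a :: as, b :: bs => if a = b then lcp as bs + 1 else 0
  | _, _ => 0

theorem lcp_nil_right (x : List Char) : lcp x [] = 0 := by cases x <;> rfl

theorem lcp_le_length_right : ∀ (x y : List Char), lcp x y ≤ y.length
  | [], [] => by simp [lcp]
  | [], _ :: _ => by simp [lcp]
  | _ :: _, [] => by simp [lcp]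
  | a :: as, b :: bs => by
      simp only [lcp, List.length_cons]
      split
      · exact Nat.succ_le_succ (lcp_le_length_right as bs)
      · simp

theorem lcp_getD : ∀ (x y : List Char) (t : Nat) (d d' : Char),
    t < lcp x y → x.getD t d = y.getD t d'
  | a :: as, b :: bs, t, d, d' => by
      simp only [lcp]
      split
      · rename_i hab
        cases t with
        | zero => intro _; simpa using hab
        | succ t => intro h; simpa using lcp_getD as bs t d d' (by omega)
      · omega
  | [], _, _, _, _ => by simp [lcp]
  | _ :: _, [], _, _, _ => by simp [lcp]

theorem lcp_append_left : ∀ (s x y : List Char), s.length ≤ x.length →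
    lcp (x ++ y) s = lcp x s
  | [], x, y, _ => by rw [lcp_nil_right, lcp_nil_right]
  | b :: bs, [], y, h => by simp at h
  | b :: bs, a :: as, y, h => by
      simp only [List.cons_append, lcp]
      rw [lcp_append_left bs as y (by simpa using h)]

-- Z-function specification: lcp of w with its suffix starting at p
def Zs (w : List Char) (p : Nat) : Nat := lcp w (w.drop p)

theorem getD_drop (w : List Char) (l t : Nat) (d : Char) :
    (w.drop l).getD t d = w.getD (l + t) d := by
  simp [List.getD_eq_getElem?_getD, List.getElem?_drop]

theorem zExtend_lcp (w : List Char) (p : Nat) (k : Nat) (hp : 1 ≤ p) :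
    zExtend w p k = k + lcp (w.drop k) (w.drop (p + k)) := by
  rw [zExtend]
  split
  · rename_i h
    obtain ⟨hin, heq⟩ := h
    have hk' : k < w.length := by omega
    rw [List.drop_eq_getElem_cons hin, List.drop_eq_getElem_cons hk']
    have heq' : w[k] = w[p + k] := by
      rwa [List.getD_eq_getElem?_getD, List.getD_eq_getElem?_getD,
        List.getElem?_eq_getElem hk', List.getElem?_eq_getElem hin] at heq
    simp only [lcp, if_pos heq']
    rw [zExtend_lcp w p (k + 1) hp]
    have hpk : p + (k + 1) = p + k + 1 := by omega
    rw [hpk]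
    omega
  · rename_i h
    by_cases hin : p + k < w.length
    · have hk' : k < w.length := by omega
      have hne : ¬ w[k] = w[p + k] := by
        intro he
        exact h ⟨hin, by
          rw [List.getD_eq_getElem?_getD, List.getD_eq_getElem?_getD,
            List.getElem?_eq_getElem hk', List.getElem?_eq_getElem hin]
          simpa using he⟩
      rw [List.drop_eq_getElem_cons hin, List.drop_eq_getElem_cons hk']
      simp only [lcp, if_neg hne]
      omega
    · rw [List.drop_eq_nil_of_le (by omega : w.length ≤ p + k), lcp_nil_right]
      omega
termination_by w.length - (p + k)
decreasing_by omega

theorem Zs_eq_zExtend (w : List Char) (p : Nat) (hp : 1 ≤ p) :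
    zExtend w p 0 = Zs w p := by
  rw [zExtend_lcp w p 0 hp]; simp [Zs]

theorem Zs_le (w : List Char) (p : Nat) : Zs w p ≤ w.length - p := by
  have := lcp_le_length_right w (w.drop p)
  simpa [Zs] using this

-- characters inside the matched prefix of a suffix agree with the prefix of w
theorem Zs_match (w : List Char) (l t : Nat) (d : Char) (h : t < Zs w l) :
    w.getD t d = w.getD (l + t) d := by
  have := lcp_getD w (w.drop l) t d d h
  rwa [getD_drop] at this

-- one step of the while loop
theorem zExtend_step (w : List Char) (p k : Nat)
    (hin : p + k < w.length) (heq : w.getD k ' ' = w.getD (p + k) ' ') :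
    zExtend w p k = zExtend w p (k + 1) := by
  rw [zExtend]; rw [dif_pos ⟨hin, heq⟩]

-- starting the extension at k is sound once the first k characters are known to match
theorem zExtend_of_prefix (w : List Char) (p : Nat) : ∀ (k : Nat),
    (∀ j, j < k → p + j < w.length ∧ w.getD j ' ' = w.getD (p + j) ' ') →
    zExtend w p k = zExtend w p 0
  | 0, _ => rfl
  | k + 1, h => by
      have hk := h k (by omega)
      rw [← zExtend_step w p k hk.1 hk.2]
      exact zExtend_of_prefix w p k (fun j hj => h j (by omega))

-- the loop body's contribution at position q
def contrib (w : List Char) (n b q : Nat) : Nat :=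
  if n + 1 < q then max b (min (q - n - 1) (Zs w q)) else b

-- main loop invariant: zLoop folds contrib over the remaining positions
theorem zLoop_eq (w : List Char) (n : Nat) : ∀ (fuel p : Nat) (z : Array Nat) (l r best : Nat),
    fuel = w.length - p →
    1 ≤ p →
    z.size = w.length →
    (∀ q, 1 ≤ q → q < p → z.getD q 0 = Zs w q) →
    ((l = 0 ∧ r = 0) ∨ (1 ≤ l ∧ l < p ∧ r = l + Zs w l)) →
    zLoop w w.length n p z l r best =
      (List.range' p (w.length - p)).foldl (contrib w n) best := by
  intro fuel p z l r best hfuel hp hz hzq hw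
  induction fuel generalizing p z l r best with
  | zero =>
      rw [zLoop, dif_neg (by omega), show w.length - p = 0 by omega]
      rfl
  | succ f ih =>
      have hlt : p < w.length := by omega
      -- the computed k is the true Z-value at p
      have hkey : zExtend w p (if p < r then min (r - p) (z.getD (p - l) 0) else 0) = Zs w p := by
        by_cases hpr : p < r
        · rcases hw with ⟨_, hr0⟩ | ⟨hl1, hlp, hr⟩
          · omega
          · have hzl : Zs w l ≤ w.length - l := Zs_le w l
            have hzpl : z.getD (p - l) 0 = Zs w (p - l) := hzq (p - l) (by omega) (by omega)
            rw [if_pos hpr, hzpl]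
            rw [zExtend_of_prefix w p (min (r - p) (Zs w (p - l))) ?_]
            · exact Zs_eq_zExtend w p hp
            · intro j hj
              refine ⟨by omega, ?_⟩
              have e1 : w.getD j ' ' = w.getD ((p - l) + j) ' ' :=
                Zs_match w (p - l) j ' ' (by omega)
              have e2 : w.getD ((p - l) + j) ' ' = w.getD (l + ((p - l) + j)) ' ' :=
                Zs_match w l ((p - l) + j) ' ' (by omega)
              have e3 : l + ((p - l) + j) = p + j := by omega
              rw [e1, e2, e3]
        · rw [if_neg hpr]; exact Zs_eq_zExtend w p hp
      rw [zLoop, dif_pos hlt]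
      simp only [hkey]
      have hzq' : ∀ q, 1 ≤ q → q < p + 1 →
          (z.setIfInBounds p (Zs w p)).getD q 0 = Zs w q := by
        intro q h1 h2
        by_cases hqp : q = p
        · subst hqp
          simp [Array.getD, hz, hlt]
        · have hq : q < p := by omega
          rw [← hzq q h1 hq]
          unfold Array.getD
          simp only [Array.size_setIfInBounds]
          split
          · rename_i hqs
            exact Array.getElem_setIfInBounds_ne hqs (by omega)
          · rfl
      have hrange : w.length - p = (w.length - (p + 1)) + 1 := by omega
      rw [hrange, List.range'_succ, List.foldl_cons]
      by_cases hcase : r < p + Zs w p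
      · rw [if_pos hcase, if_pos hcase]
        rw [ih (p + 1) _ p (p + Zs w p) _ (by omega) (by omega)
          (by simp [Array.size_setIfInBounds, hz]) hzq'
          (Or.inr ⟨hp, by omega, rfl⟩)]
        simp [contrib]
      · rw [if_neg hcase, if_neg hcase]
        have hw' : (l = 0 ∧ r = 0) ∨ (1 ≤ l ∧ l < p + 1 ∧ r = l + Zs w l) := by
          rcases hw with ⟨h1, h2⟩ | ⟨h1, h2, h3⟩
          · exact Or.inl ⟨h1, h2⟩
          · exact Or.inr ⟨h1, by omega, h3⟩
        rw [ih (p + 1) _ l r _ (by omega) (by omega)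
          (by simp [Array.size_setIfInBounds, hz]) hzq' hw']
        simp [contrib]

-- positions up to the separator contribute nothing to best
theorem fold_skip (w : List Char) (n : Nat) : ∀ (l : List Nat) (b : Nat),
    (∀ q ∈ l, ¬ n + 1 < q) → l.foldl (contrib w n) b = b
  | [], _, _ => rfl
  | q :: l, b, h => by
      simp only [List.foldl_cons, contrib, if_neg (h q (by simp))]
      exact fold_skip w n l b (fun x hx => h x (by simp [hx]))

-- the fold of contrib over all positions reduces to the max over the shifts 1..n-1
theorem fold_main (cs : List Char) (h2 : 2 ≤ cs.length) :
    (List.range' 1 ((cs ++ '\x00' :: cs.map complementGet).length - 1)).foldl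
      (contrib (cs ++ '\x00' :: cs.map complementGet) cs.length) 0 =
    (List.range' 1 (cs.length - 1)).foldl
      (fun b k => max b (min k (lcp cs ((cs.map complementGet).drop k)))) 0 := by
  have hwlen : (cs ++ '\x00' :: cs.map complementGet).length = 2 * cs.length + 1 := by
    simp; omega
  have hsplit : List.range' 1 ((cs ++ '\x00' :: cs.map complementGet).length - 1) =
      List.range' 1 (cs.length + 1) ++ List.range' (cs.length + 2) (cs.length - 1) := by
    rw [hwlen]
    have := @List.range'_append 1 (cs.length + 1) (cs.length - 1) 1
    rw [show (1 : Nat) + 1 * (cs.length + 1) = cs.length + 2 by omega] at this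
    rw [this, show cs.length + 1 + (cs.length - 1) = 2 * cs.length + 1 - 1 by omega]
  rw [hsplit, List.foldl_append]
  rw [fold_skip (cs ++ '\x00' :: cs.map complementGet) cs.length
    (List.range' 1 (cs.length + 1)) 0 (by
    intro q hq
    have := List.mem_range'_1.mp hq
    omega)]
  have hmap2 : List.range' (cs.length + 2) (cs.length - 1) =
      (List.range' 1 (cs.length - 1)).map (fun k => k + (cs.length + 1)) := by
    rw [List.range'_eq_map_range, List.range'_eq_map_range, List.map_map]
    apply List.map_congr_left
    intro t _
    simp; omega
  rw [hmap2, List.foldl_map]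
  apply PySem.List.foldl_congr_mem
  intro b k hk
  have hk' : 1 ≤ k ∧ k < 1 + (cs.length - 1) := by simpa using List.mem_range'_1.mp hk
  have hdrop : (cs ++ '\x00' :: cs.map complementGet).drop (k + (cs.length + 1)) =
      (cs.map complementGet).drop k := by
    rw [List.drop_append, List.drop_eq_nil_of_le (by omega)]
    rw [show k + (cs.length + 1) - cs.length = k + 1 by omega, List.drop_succ_cons]
    rfl
  have hzs : Zs (cs ++ '\x00' :: cs.map complementGet) (k + (cs.length + 1)) =
      lcp cs ((cs.map complementGet).drop k) := by
    rw [Zs, hdrop]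
    exact lcp_append_left _ _ _ (by simp)
  rw [contrib, if_pos (by omega), hzs,
    show k + (cs.length + 1) - cs.length - 1 = k by omega]

theorem alt_eq_fold (s : String) (h2 : 2 ≤ s.toList.length) :
    calculate_self_complementarity_alt s =
      ((List.range' 1 (s.toList.length - 1)).foldl
        (fun b k => max b (min k (lcp s.toList ((s.toList.map complementGet).drop k)))) 0 : Nat) := by
  unfold calculate_self_complementarity_alt
  rw [if_neg (by omega)]
  show ((zLoop (s.toList ++ '\x00' :: s.toList.map complementGet)
      (s.toList ++ '\x00' :: s.toList.map complementGet).length s.toList.length 1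
      (Array.replicate (s.toList ++ '\x00' :: s.toList.map complementGet).length 0)
      0 0 0 : Nat) : Int) = _
  congr 1
  rw [zLoop_eq (s.toList ++ '\x00' :: s.toList.map complementGet) s.toList.length
    ((s.toList ++ '\x00' :: s.toList.map complementGet).length - 1) 1 _ 0 0 0 rfl
    (le_refl 1) (by simp) (fun q h1 hq => absurd hq (by omega)) (Or.inl ⟨rfl, rfl⟩)]
  exact fold_main s.toList h2

-- A's inner loop, from position j with accumulator acc, adds min(cap - j, lcp of the tails)
theorem aInner_go (cs : List Char) (i cap j acc : Nat) (h1 : 1 ≤ i) (h2 : i < cs.length)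
    (hcap : cap = min i (cs.length - i)) (hj : j ≤ cap) :
    aInner cs cs.length i j cap acc =
      acc + min (cap - j)
        (lcp (cs.drop j) ((cs.map complementGet).drop (cs.length - i + j))) := by
  rw [aInner]
  by_cases hlt : j < cap
  · have hjn : j < cs.length := by omega
    have hkj : cs.length - i + j < cs.length := by omega
    have hkj' : cs.length - i + j < (cs.map complementGet).length := by simpa using hkj
    rw [dif_pos hlt, if_neg (by omega)]
    rw [List.drop_eq_getElem_cons hjn, List.drop_eq_getElem_cons hkj']
    have hcm : (cs.map complementGet)[cs.length - i + j] = complementGet cs[cs.length - i + j] :=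
      List.getElem_map complementGet
    have hgd : cs.getD j ' ' = cs[j] := by
      rw [List.getD_eq_getElem?_getD, List.getElem?_eq_getElem hjn]; rfl
    have hgd2 : cs.getD (cs.length - i + j) ' ' = cs[cs.length - i + j] := by
      rw [List.getD_eq_getElem?_getD, List.getElem?_eq_getElem hkj]; rfl
    simp only [lcp, hcm, hgd, hgd2]
    by_cases he : cs[j] = complementGet cs[cs.length - i + j]
    · rw [if_pos he, if_pos he]
      rw [aInner_go cs i cap (j + 1) (acc + 1) h1 h2 hcap (by omega)]
      have : cs.length - i + (j + 1) = cs.length - i + j + 1 := by omega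
      rw [this]
      omega
    · rw [if_neg he, if_neg he]
      omega
  · rw [dif_neg hlt]
    have : cap - j = 0 := by omega
    omega
termination_by cap - j
decreasing_by omega

theorem aInner_eq (cs : List Char) (i : Nat) (h1 : 1 ≤ i) (h2 : i < cs.length) :
    aInner cs cs.length i 0 (min i (cs.length - i)) 0 =
      min (cs.length - i) (lcp cs ((cs.map complementGet).drop (cs.length - i))) := by
  rw [aInner_go cs i (min i (cs.length - i)) 0 0 h1 h2 rfl (by omega)]
  have hL : lcp cs ((cs.map complementGet).drop (cs.length - i)) ≤ i := by
    have := lcp_le_length_right cs ((cs.map complementGet).drop (cs.length - i))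
    simp only [List.length_drop, List.length_map] at this
    omega
  simp only [List.drop_zero, Nat.add_zero, Nat.zero_add]
  omega

theorem foldl_max_shift (g : Nat → Nat) : ∀ (l : List Nat) (b x : Nat),
    l.foldl (fun b v => max b (g v)) (max b (g x)) = max (l.foldl (fun b v => max b (g v)) b) (g x)
  | [], _, _ => rfl
  | y :: l, b, x => by
      simp only [List.foldl_cons]
      rw [show max (max b (g x)) (g y) = max (max b (g y)) (g x) by omega]
      exact foldl_max_shift g l (max b (g y)) x

-- a max-fold is insensitive to reversal
theorem foldl_max_rev (g : Nat → Nat) : ∀ (l : List Nat) (b : Nat),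
    l.reverse.foldl (fun b v => max b (g v)) b = l.foldl (fun b v => max b (g v)) b
  | [], _ => rfl
  | y :: l, b => by
      simp only [List.reverse_cons, List.foldl_append, List.foldl_cons, List.foldl_nil]
      rw [foldl_max_rev g l b]
      exact (foldl_max_shift g l b y).symm

-- A enumerates the shifts k = n - i in descending order; the list of them is the reverse range
theorem map_range'_sub : ∀ (c n : Nat), c < n →
    (List.range' 1 c).map (fun i => n - i) = (List.range' (n - c) c).reverse
  | 0, n, _ => rfl
  | c + 1, n, h => by
      rw [List.range'_concat, List.map_append, map_range'_sub c n (by omega)]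
      have h1 : n - (c + 1) + 1 = n - c := by omega
      rw [List.range'_succ, h1, List.reverse_cons]
      simp only [List.map_cons, List.map_nil, List.append_cancel_left_eq]
      rw [show 1 + 1 * c = c + 1 by omega]

theorem a_eq_fold (s : String) :
    calculate_self_complementarity s =
      ((List.range' 1 (s.toList.length - 1)).foldl
        (fun b k => max b (min k (lcp s.toList ((s.toList.map complementGet).drop k)))) 0 : Nat) := by
  unfold calculate_self_complementarity
  congr 1
  rcases Nat.eq_zero_or_pos s.toList.length with h0 | h1
  · rw [h0]; rfl
  · have hstep : (List.range' 1 (s.toList.length - 1)).foldl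
        (fun b i => max b (aInner s.toList s.toList.length i 0 (min i (s.toList.length - i)) 0)) 0 =
        (List.range' 1 (s.toList.length - 1)).foldl
        (fun b i => max b (min (s.toList.length - i)
          (lcp s.toList ((s.toList.map complementGet).drop (s.toList.length - i))))) 0 := by
      apply PySem.List.foldl_congr_mem
      intro acc i hi
      have hi' : 1 ≤ i ∧ i < 1 + (s.toList.length - 1) := by
        simpa using List.mem_range'_1.mp hi
      rw [aInner_eq s.toList i hi'.1 (by omega)]
    rw [hstep]
    have hmap : (List.range' 1 (s.toList.length - 1)).foldl
        (fun b i => max b (min (s.toList.length - i)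
          (lcp s.toList ((s.toList.map complementGet).drop (s.toList.length - i))))) 0 =
        ((List.range' 1 (s.toList.length - 1)).map (fun i => s.toList.length - i)).foldl
        (fun b k => max b (min k (lcp s.toList ((s.toList.map complementGet).drop k)))) 0 := by
      rw [List.foldl_map]
    rw [hmap, map_range'_sub (s.toList.length - 1) s.toList.length (by omega),
      show s.toList.length - (s.toList.length - 1) = 1 by omega,
      foldl_max_rev]

-- ===== VERDICT (by name: the statement is the Claim_ definition above) =====
theorem calculate_self_complementarity_spec : Claim_equal_calculate_self_complementarity := by
  intro sequence _dom
  unfold Spec_calculate_self_complementarity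
  by_cases h2 : 2 ≤ sequence.toList.length
  · rw [a_eq_fold sequence, alt_eq_fold sequence h2]
  · have h0 : sequence.toList.length - 1 = 0 := by omega
    rw [a_eq_fold sequence, h0]
    unfold calculate_self_complementarity_alt
    rw [if_pos (by omega : sequence.toList.length < 2)]
    simp
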